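-- pv_equiv track=rewrite | github.com/lucasmoeskops/advent-of-code-python | src/y2024/21. Keypad Conundrum.py | find_directional_route_all
-- ===== SOURCE A (Python) =====
-- DIRECTIONAL_LOOKUP = {
--     '^': (1, 0),
--     'A': (2, 0),
--     '<': (0, 1),
--     'v': (1, 1),
--     '>': (2, 1),
-- }
--
-- def make_route(sx, sy, ex, ey, horizontal_first=True):
--     horizontal = ('>' * (ex - sx) if ex > sx else '<' * (sx - ex))
--     vertical = ('v' * (ey - sy) if ey > sy else '^' * (sy - ey))
--     return ((horizontal + vertical) if horizontal_first else (vertical + horizontal)) + 'A'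
--
-- def find_directional_route_all(code, p=None):
--     if not code:
--         yield ''
--         return
--
--     x, y = p if p else DIRECTIONAL_LOOKUP['A']
--     c = code[0]
--     nx, ny = DIRECTIONAL_LOOKUP[c]
--
--     if option_1 := (x != 0 or ny != 0) and make_route(x, y, nx, ny, horizontal_first=False):
--         for rest in find_directional_route_all(code[1:], (nx, ny)):
--             yield option_1 + rest
--
--     option_2 = (nx != 0 or y != 0) and make_route(x, y, nx, ny, horizontal_first=True)
--
--     if option_2 and option_1 != option_2:
--         for rest in find_directional_route_all(code[1:], (nx, ny)):
--             yield option_2 + rest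
-- ===== SOURCE B (Python) =====
-- DIRECTIONAL_LOOKUP = {
--     '^': (1, 0),
--     'A': (2, 0),
--     '<': (0, 1),
--     'v': (1, 1),
--     '>': (2, 1),
-- }
--
-- def find_directional_route_all(code, p=None):
--     # One forward pass builds the per-character option table, then the routes
--     # are assembled back-to-front (no recursion, no make_route helper).
--     x, y = p if p else DIRECTIONAL_LOOKUP['A']
--     tables = []
--     for c in code:
--         nx, ny = DIRECTIONAL_LOOKUP[c]
--         horizontal = '>' * (nx - x) if nx > x else '<' * (x - nx)
--         vertical = 'v' * (ny - y) if ny > y else '^' * (y - ny)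
--         opts = []
--         if x != 0 or ny != 0:
--             opts.append(vertical + horizontal + 'A')
--         r2 = horizontal + vertical + 'A'
--         if (nx != 0 or y != 0) and (not opts or opts[0] != r2):
--             opts.append(r2)
--         tables.append(opts)
--         x, y = nx, ny
--     results = ['']
--     for opts in reversed(tables):
--         results = [o + r for o in opts for r in results]
--     yield from results
-- ===== Notes on version B (the rewrite author's own statement) =====
-- stated objective: alternative
-- what changed: Replaces A's twin recursive generator calls by a single forward pass that tabulates each character's option list, then assembles all routes by a back-to-front product over the table; Pre_ excludes codes with a character outside DIRECTIONAL_LOOKUP, on which A raises KeyError when consumed.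
import Mathlib
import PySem

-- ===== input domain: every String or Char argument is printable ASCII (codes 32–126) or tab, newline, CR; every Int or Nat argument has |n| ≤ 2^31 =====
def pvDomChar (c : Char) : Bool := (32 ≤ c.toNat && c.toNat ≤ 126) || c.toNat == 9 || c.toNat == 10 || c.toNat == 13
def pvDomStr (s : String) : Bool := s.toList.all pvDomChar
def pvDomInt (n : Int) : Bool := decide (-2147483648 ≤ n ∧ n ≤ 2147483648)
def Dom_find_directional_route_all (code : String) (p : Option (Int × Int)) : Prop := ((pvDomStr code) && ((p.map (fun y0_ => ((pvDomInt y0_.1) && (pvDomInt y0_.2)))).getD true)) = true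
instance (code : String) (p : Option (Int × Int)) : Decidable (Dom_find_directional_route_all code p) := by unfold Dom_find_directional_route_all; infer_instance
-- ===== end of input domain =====

-- B replaces A's twin recursive generator by one forward pass that tabulates the per-character
-- option lists and a back-to-front product assembling the routes (objective: alternative decomposition).
-- Both Pythons return generators; equivalence is about the yielded sequence as a list.

-- shared module constant DIRECTIONAL_LOOKUP (used by both Pythons)
def pvLookup (c : Char) : Option (Int × Int) :=
  if c = '^' then some (1, 0)
  else if c = 'A' then some (2, 0)
  else if c = '<' then some (0, 1)
  else if c = 'v' then some (1, 1)
  else if c = '>' then some (2, 1)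
  else none

-- Python's 's' * n (negative n gives the empty string)
def pvRep (ch : Char) (n : Int) : List Char := List.replicate n.toNat ch

-- ===== PORT A =====
def pvMakeRoute (sx sy ex ey : Int) (hf : Bool) : List Char :=
  let horizontal := if ex > sx then pvRep '>' (ex - sx) else pvRep '<' (sx - ex)
  let vertical := if ey > sy then pvRep 'v' (ey - sy) else pvRep '^' (sy - ey)
  (if hf then horizontal ++ vertical else vertical ++ horizontal) ++ ['A']

def pvFindA : List Char → Int × Int → List (List Char)
  | [], _ => [[]]
  | c :: rest, (x, y) =>
    match pvLookup c with
    | none => []   -- Python raises KeyError here; such codes are outside Pre_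
    | some (nx, ny) =>
      let option1 : Option (List Char) :=
        if x ≠ 0 ∨ ny ≠ 0 then some (pvMakeRoute x y nx ny false) else none
      let option2 : Option (List Char) :=
        if nx ≠ 0 ∨ y ≠ 0 then some (pvMakeRoute x y nx ny true) else none
      (match option1 with
       | some o1 => (pvFindA rest (nx, ny)).map (fun r => o1 ++ r)
       | none => []) ++
      (match option2 with
       | some o2 =>
         if option1 ≠ some o2 then (pvFindA rest (nx, ny)).map (fun r => o2 ++ r) else []
       | none => [])

def find_directional_route_all (code : String) (p : Option (Int × Int)) : List String :=
  (pvFindA code.toList (p.getD (2, 0))).map String.ofList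

-- ===== PORT B =====
-- forward pass: the per-character option table
def pvTables : List Char → Int × Int → List (List (List Char))
  | [], _ => []
  | c :: cs, (x, y) =>
    match pvLookup c with
    | none => [[]]   -- Python raises KeyError here; such codes are outside Pre_
    | some (nx, ny) =>
      let horizontal := if nx > x then pvRep '>' (nx - x) else pvRep '<' (x - nx)
      let vertical := if ny > y then pvRep 'v' (ny - y) else pvRep '^' (y - ny)
      let opts := if x ≠ 0 ∨ ny ≠ 0 then [vertical ++ horizontal ++ ['A']] else []
      let r2 := horizontal ++ vertical ++ ['A']
      let opts :=
        if (nx ≠ 0 ∨ y ≠ 0) ∧ (opts = [] ∨ opts.head? ≠ some r2) then opts ++ [r2] else opts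
      opts :: pvTables cs (nx, ny)

def find_directional_route_all_alt (code : String) (p : Option (Int × Int)) : List String :=
  (((pvTables code.toList (p.getD (2, 0))).reverse.foldl
      (fun res opts => opts.flatMap (fun o => res.map (fun r => o ++ r))) [[]]).map String.ofList)

-- ===== PRECONDITION & SPEC =====
-- Pre_ excludes exactly the codes containing a character outside DIRECTIONAL_LOOKUP,
-- on which the Python A raises KeyError when consumed.
def Pre_find_directional_route_all (code : String) (p : Option (Int × Int)) : Prop :=
  code.toList.all (fun c => c == '^' || c == 'A' || c == '<' || c == 'v' || c == '>') = true
instance (code : String) (p : Option (Int × Int)) : Decidable (Pre_find_directional_route_all code p) := by unfold Pre_find_directional_route_all; infer_instance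

def pvWitness_find_directional_route_all : String × (Option (Int × Int)) := ("<vA", none)

def Spec_find_directional_route_all (code : String) (p : Option (Int × Int)) (out : List String) : Prop := out = find_directional_route_all_alt code p
instance (code : String) (p : Option (Int × Int)) (out : List String) : Decidable (Spec_find_directional_route_all code p out) := by unfold Spec_find_directional_route_all; infer_instance

-- ===== CLAIM (what is proved, stated in full; the proofs are below) =====
def Claim_equal_find_directional_route_all : Prop := ∀ (code : String) (p : Option (Int × Int)), Dom_find_directional_route_all code p → Pre_find_directional_route_all code p → Spec_find_directional_route_all code p (find_directional_route_all code p)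

-- ===== LEMMAS AND PROOFS =====

-- B's product, written as a foldr over the table list
def pvCombine (ts : List (List (List Char))) : List (List Char) :=
  ts.foldr (fun opts res => opts.flatMap (fun o => res.map (fun r => o ++ r))) [[]]

lemma pvCombine_eq_foldl (ts : List (List (List Char))) :
    ts.reverse.foldl
      (fun res opts => opts.flatMap (fun o => res.map (fun r => o ++ r))) [[]] = pvCombine ts := by
  unfold pvCombine
  exact List.foldl_reverse (l := ts)
    (f := fun res opts => opts.flatMap (fun o => res.map (fun r => o ++ r))) (b := [[]])

lemma pvFindA_eq_combine : ∀ (cs : List Char) (s : Int × Int),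
    pvFindA cs s = pvCombine (pvTables cs s) := by
  intro cs
  induction cs with
  | nil => intro s; simp [pvFindA, pvTables, pvCombine]
  | cons c cs ih =>
    intro ⟨x, y⟩
    match hL : pvLookup c with
    | none => simp [pvFindA, pvTables, hL, pvCombine]
    | some (nx, ny) =>
      simp only [pvFindA, pvTables, hL, pvCombine, List.foldr_cons]
      rw [← pvCombine, ← ih (nx, ny)]
      set H := (if nx > x then pvRep '>' (nx - x) else pvRep '<' (x - nx)) with hH
      set V := (if ny > y then pvRep 'v' (ny - y) else pvRep '^' (y - ny)) with hV
      have e1 : pvMakeRoute x y nx ny false = V ++ (H ++ ['A']) := by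
        rw [hH, hV]; simp [pvMakeRoute, List.append_assoc]
      have e2 : pvMakeRoute x y nx ny true = H ++ (V ++ ['A']) := by
        rw [hH, hV]; simp [pvMakeRoute, List.append_assoc]
      rw [e1, e2]
      by_cases h1 : x ≠ 0 ∨ ny ≠ 0 <;>
        by_cases h2 : nx ≠ 0 ∨ y ≠ 0 <;>
          by_cases h3 : V ++ (H ++ ['A']) = H ++ (V ++ ['A']) <;>
            simp [h1, h2, h3, List.flatMap]

-- ===== VERDICT (by name: the statement is the Claim_ definition above) =====
theorem find_directional_route_all_spec : Claim_equal_find_directional_route_all := by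
  intro code _p _ _
  unfold Spec_find_directional_route_all find_directional_route_all find_directional_route_all_alt
  rw [pvCombine_eq_foldl, pvFindA_eq_combine]
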